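-- pv_equiv track=rewrite | github.com/GundalaNikhil/DSA | dsa-problems/Bitwise/test_all_16_comprehensive.py | bit_013_solution
-- ===== SOURCE A (Python) =====
-- def bit_013_solution(n, arr):
--     if n <= 1:
--         return 0
--
--     arr.sort()
--     min_max_xor = float('inf')
--
--     # DP or brute force for small n
--     for i in range(n):
--         for j in range(i + 1, n):
--             xor_val = arr[i] ^ arr[j]
--             min_max_xor = min(min_max_xor, max(arr[i], xor_val))
--
--     return min_max_xor
-- ===== SOURCE B (Python) =====
-- def bit_013_solution(n, arr):
--     # Per-element decomposition: for each element x of the sorted prefix,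
--     # find the minimal XOR with any later element, then take max(x, that min);
--     # answer is the minimum of those candidates.  (Does not mutate arr.)
--     if n <= 1:
--         return 0
--     s = sorted(arr)[:n]
--     best = None
--     while len(s) > 1:
--         x, s = s[0], s[1:]
--         cand = max(x, min(x ^ v for v in s))
--         if best is None or cand < best:
--             best = cand
--     return best
-- ===== Notes on version B (the rewrite author's own statement) =====
-- stated objective: alternative
-- what changed: B replaces A's double index loop over all pairs (min of max(a_i, a_i^a_j) per pair) by a per-element decomposition on suffixes of the sorted prefix: for each element it first computes the minimal XOR with all later elements, then applies a single max and folds the candidates with min; A also sorts arr in place while B leaves it untouched (the equivalence is about the return value).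
import Mathlib
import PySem

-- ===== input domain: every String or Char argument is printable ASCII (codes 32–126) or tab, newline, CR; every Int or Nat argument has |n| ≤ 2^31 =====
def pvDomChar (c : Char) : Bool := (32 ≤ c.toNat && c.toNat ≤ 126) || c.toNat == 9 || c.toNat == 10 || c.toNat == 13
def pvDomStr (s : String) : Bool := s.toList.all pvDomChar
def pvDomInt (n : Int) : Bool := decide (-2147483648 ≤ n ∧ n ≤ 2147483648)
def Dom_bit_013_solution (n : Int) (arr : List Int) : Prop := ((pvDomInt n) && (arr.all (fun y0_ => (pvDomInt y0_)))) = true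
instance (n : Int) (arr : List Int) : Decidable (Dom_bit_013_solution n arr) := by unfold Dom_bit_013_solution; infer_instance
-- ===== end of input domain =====

-- B replaces A's double index loop over all pairs by a per-element pass on suffixes of
-- the sorted prefix (min-XOR with the later elements first, then one max); A sorts arr
-- in place while B does not — the equivalence proved here is about the return value.

-- ===== PORT A =====
def bit_013_solution (n : Int) (arr : List Int) : Int :=
  if n ≤ 1 then 0
  else
    let s := PySem.List.sorted arr (fun x => x)
    let res : Option Int :=
      (PySem.List.pyRange 0 n).foldl (fun acc i =>
        (PySem.List.pyRange (i + 1) n).foldl (fun acc2 j =>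
          let xorVal := PySem.Int.bxor (PySem.List.pyGetD s i 0) (PySem.List.pyGetD s j 0)
          let cand := max (PySem.List.pyGetD s i 0) xorVal
          some (match acc2 with
                | none => cand
                | some m => min m cand)) acc) none
    res.getD 0

-- ===== PORT B =====
-- min(x ^ v for v in (v :: vs))
def altMinXor (x v : Int) (vs : List Int) : Int :=
  vs.foldl (fun m w => min m (PySem.Int.bxor x w)) (PySem.Int.bxor x v)

def altLoop : List Int → Option Int → Option Int
  | x :: v :: vs, best =>
      altLoop (v :: vs)
        (some (match best with
               | none => max x (altMinXor x v vs)
               | some b => min b (max x (altMinXor x v vs))))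
  | _, best => best

def bit_013_solution_alt (n : Int) (arr : List Int) : Int :=
  if n ≤ 1 then 0
  else
    let s := PySem.List.slice (PySem.List.sorted arr (fun x => x)) none (some n)
    (altLoop s none).getD 0

-- ===== PRECONDITION & SPEC =====
-- A raises IndexError when n > len(arr) (and n ≥ 2); those inputs are excluded.
def Pre_bit_013_solution (n : Int) (arr : List Int) : Prop :=
  n ≤ 1 ∨ n ≤ (arr.length : Int)
instance (n : Int) (arr : List Int) : Decidable (Pre_bit_013_solution n arr) := by
  unfold Pre_bit_013_solution; infer_instance

def pvWitness_bit_013_solution : Int × List Int := (3, [5, 1, 2])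

def Spec_bit_013_solution (n : Int) (arr : List Int) (out : Int) : Prop :=
  out = bit_013_solution_alt n arr
instance (n : Int) (arr : List Int) (out : Int) : Decidable (Spec_bit_013_solution n arr out) := by
  unfold Spec_bit_013_solution; infer_instance

-- ===== CLAIM (what is proved, stated in full; the proofs are below) =====
def Claim_equal_bit_013_solution : Prop :=
  ∀ (n : Int) (arr : List Int), Dom_bit_013_solution n arr →
    Pre_bit_013_solution n arr → Spec_bit_013_solution n arr (bit_013_solution n arr)

-- ===== LEMMAS AND PROOFS =====

-- option-min accumulator shared by both loops ("None = +inf")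
def pvMinO : Option Int → Int → Int
  | none, c => c
  | some m, c => min m c

theorem pvMinO_match (b : Option Int) (c : Int) :
    (match b with | none => c | some m => min m c) = pvMinO b c := by
  cases b <;> rfl

theorem pvMinO_assoc (b : Option Int) (y x : Int) :
    pvMinO (some (pvMinO b y)) x = pvMinO b (min y x) := by
  cases b <;> simp [pvMinO, min_assoc]

-- reference: fold candidates of all ordered pairs, head-first
def pairFold : List Int → Option Int → Option Int
  | [], acc => acc
  | x :: rest, acc =>
      pairFold rest
        (rest.foldl (fun a v => some (pvMinO a (max x (PySem.Int.bxor x v)))) acc)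

-- B's inner min-XOR fold, followed by one max, equals the fold of per-pair maxima
theorem inner_fold_eq (x : Int) :
    ∀ (vs : List Int) (c : Int) (b : Option Int),
      vs.foldl (fun a v => some (pvMinO a (max x (PySem.Int.bxor x v))))
          (some (pvMinO b (max x c)))
        = some (pvMinO b (max x (vs.foldl (fun m w => min m (PySem.Int.bxor x w)) c))) := by
  intro vs
  induction vs with
  | nil => intro c b; rfl
  | cons w ws ih =>
      intro c b
      have h1 : pvMinO (some (pvMinO b (max x c))) (max x (PySem.Int.bxor x w))
          = pvMinO b (max x (min c (PySem.Int.bxor x w))) := by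
        rw [pvMinO_assoc, ← max_min_distrib_left]
      simp only [List.foldl_cons, h1]
      exact ih (min c (PySem.Int.bxor x w)) b

theorem altLoop_eq_pairFold :
    ∀ (l : List Int) (best : Option Int), altLoop l best = pairFold l best := by
  intro l
  induction l with
  | nil => intro best; rfl
  | cons x rest ih =>
      intro best
      cases rest with
      | nil => rfl
      | cons v vs =>
          show altLoop (v :: vs) _ = pairFold (v :: vs) _
          rw [ih]
          congr 1
          simp only [List.foldl_cons, pvMinO_match, altMinXor]
          exact (inner_fold_eq x vs (PySem.Int.bxor x v) best).symm

-- A's nested index loops over a list t (range bound = length of t) equal pairFold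
theorem outer_fold_eq (t : List Int) :
    ∀ (d k : Nat) (acc : Option Int), t.length = k + d →
      (PySem.List.pyRange (k : Int) (t.length : Int)).foldl (fun acc i =>
          (PySem.List.pyRange (i + 1) (t.length : Int)).foldl (fun a j =>
            some (pvMinO a (max (PySem.List.pyGetD t i 0)
              (PySem.Int.bxor (PySem.List.pyGetD t i 0) (PySem.List.pyGetD t j 0))))) acc) acc
        = pairFold (t.drop k) acc := by
  intro d
  induction d with
  | zero =>
      intro k acc hk
      rw [PySem.List.pyRange_one_eq_nil (by omega)]
      rw [List.drop_of_length_le (by omega)]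
      rfl
  | succ d ih =>
      intro k acc hk
      have hklt : k < t.length := by omega
      rw [PySem.List.pyRange_one_cons (by exact_mod_cast hklt)]
      rw [List.foldl_cons]
      have hx : PySem.List.pyGetD t (k : Int) 0 = t[k] := by
        rw [PySem.List.pyGetD_natCast]; exact List.getD_eq_getElem t 0 hklt
      have hcast : (k : Int) + 1 = ((k + 1 : Nat) : Int) := by push_cast; ring
      have hinner : (PySem.List.pyRange ((k : Int) + 1) (t.length : Int)).foldl (fun a j =>
            some (pvMinO a (max (PySem.List.pyGetD t (k : Int) 0)
              (PySem.Int.bxor (PySem.List.pyGetD t (k : Int) 0) (PySem.List.pyGetD t j 0))))) acc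
          = (t.drop (k + 1)).foldl (fun a v =>
              some (pvMinO a (max t[k] (PySem.Int.bxor t[k] v)))) acc := by
        rw [hx]
        have := PySem.List.foldl_pyRange_pyGetD' t 0
          (fun a v => some (pvMinO a (max t[k] (PySem.Int.bxor t[k] v)))) acc
          (a := (k : Int) + 1) (by omega)
        simpa using this
      rw [hinner]
      have hdrop : t.drop k = t[k] :: t.drop (k + 1) := (List.getElem_cons_drop hklt).symm
      rw [hdrop]
      show _ = pairFold (t.drop (k+1)) _
      rw [← ih (k + 1) _ (by omega)]
      rw [hcast]

theorem bit_013_main (n : Int) (arr : List Int) (h2 : ¬ n ≤ 1)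
    (hlen : n ≤ (arr.length : Int)) :
    bit_013_solution n arr = bit_013_solution_alt n arr := by
  simp only [bit_013_solution, bit_013_solution_alt, if_neg h2]
  set s := PySem.List.sorted arr (fun x => x) with hs
  have hslen : s.length = arr.length := PySem.List.length_sorted arr _ _
  have hn0 : 0 ≤ n := by omega
  set t := s.take n.toNat with ht
  have htlen : t.length = n.toNat := by
    rw [ht, List.length_take]
    have : n.toNat ≤ s.length := by rw [hslen]; omega
    omega
  have hnt : (t.length : Int) = n := by rw [htlen]; omega
  -- B side: slice is the prefix t
  have hslice : PySem.List.slice s none (some n) = t := by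
    rw [PySem.List.slice_to s hn0]
  rw [hslice, altLoop_eq_pairFold]
  -- A side: replace pyGetD s by pyGetD t inside the loops, then apply outer_fold_eq
  have hget : ∀ i : Int, 0 ≤ i → i < n →
      PySem.List.pyGetD s i 0 = PySem.List.pyGetD t i 0 := by
    intro i h0 h1
    have his : i < (s.length : Int) := by omega
    have hit : i < (t.length : Int) := by omega
    rw [PySem.List.pyGetD_eq_getElem s 0 h0 his, PySem.List.pyGetD_eq_getElem t 0 h0 hit]
    simp only [ht, List.getElem_take]
  have hcong : (PySem.List.pyRange 0 n).foldl (fun acc i =>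
        (PySem.List.pyRange (i + 1) n).foldl (fun acc2 j =>
          some (match acc2 with
                | none => max (PySem.List.pyGetD s i 0)
                    (PySem.Int.bxor (PySem.List.pyGetD s i 0) (PySem.List.pyGetD s j 0))
                | some m => min m (max (PySem.List.pyGetD s i 0)
                    (PySem.Int.bxor (PySem.List.pyGetD s i 0) (PySem.List.pyGetD s j 0))))) acc)
        (none : Option Int)
      = (PySem.List.pyRange 0 (t.length : Int)).foldl (fun acc i =>
          (PySem.List.pyRange (i + 1) (t.length : Int)).foldl (fun a j =>
            some (pvMinO a (max (PySem.List.pyGetD t i 0)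
              (PySem.Int.bxor (PySem.List.pyGetD t i 0) (PySem.List.pyGetD t j 0))))) acc)
          (none : Option Int) := by
    rw [hnt]
    apply PySem.List.foldl_congr_mem
    intro acc i hi
    have hi' := (PySem.List.mem_pyRange_one).1 hi
    apply PySem.List.foldl_congr_mem
    intro a j hj
    have hj' := (PySem.List.mem_pyRange_one).1 hj
    rw [pvMinO_match, hget i hi'.1 hi'.2, hget j (by omega) hj'.2]
  rw [hcong]
  have hout := outer_fold_eq t t.length 0 none (by omega)
  simp only [Nat.cast_zero, List.drop_zero] at hout
  rw [hout]

-- ===== VERDICT (by name: the statement is the Claim_ definition above) =====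
theorem bit_013_solution_spec : Claim_equal_bit_013_solution := by
  intro n arr _ hpre
  unfold Spec_bit_013_solution
  by_cases h1 : n ≤ 1
  · unfold bit_013_solution bit_013_solution_alt
    rw [if_pos h1, if_pos h1]
  · cases hpre with
    | inl h => exact absurd h h1
    | inr hlen => exact bit_013_main n arr h1 hlen
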